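-- pv_equiv track=rewrite | github.com/insigh/Practical-ReinforcemntLearning | windows/jingdong2019/jingdong/first.py | get_style
-- ===== SOURCE A (Python) =====
-- def get_style(s):
--     dict_ = {}
--     for i, ch in enumerate(s):
--         if ch in dict_.keys():
--             dict_[ch] += 1
--         else:
--             dict_[ch] = 1
--     template = []
--     for i, ch in enumerate(s):
--         template.append(dict_[ch])
--     return template
-- ===== SOURCE B (Python) =====
-- def get_style(s):
--     res = [0] * len(s)
--     for ch in dict.fromkeys(s):
--         idxs = [i for i, c in enumerate(s) if c == ch]
--         for i in idxs:
--             res[i] = len(idxs)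
--     return res
-- ===== Notes on version B (the rewrite author's own statement) =====
-- stated objective: alternative
-- what changed: Instead of A's per-character frequency-dict build plus per-position lookup pass, B allocates a zero array and, grouping by distinct character, gathers each character's positions once and writes the group size into the result at those positions by random access.
import Mathlib
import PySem

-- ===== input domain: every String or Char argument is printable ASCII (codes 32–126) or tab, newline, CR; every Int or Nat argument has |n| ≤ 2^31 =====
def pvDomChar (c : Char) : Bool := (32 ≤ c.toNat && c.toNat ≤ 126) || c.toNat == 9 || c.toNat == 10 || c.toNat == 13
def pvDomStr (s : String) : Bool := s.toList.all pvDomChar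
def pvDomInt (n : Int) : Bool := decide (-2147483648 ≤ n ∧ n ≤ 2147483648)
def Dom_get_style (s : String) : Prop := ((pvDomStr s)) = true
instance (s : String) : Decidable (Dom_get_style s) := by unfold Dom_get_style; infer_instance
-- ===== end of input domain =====

-- B replaces A's frequency-dict build + lookup pass by grouping: a zero array filled per distinct
-- character with that character's position-group size (alternative structure, not faster).

-- ===== PORT A =====
-- first loop: build the frequency dict; the `ch in dict_.keys()` branch decides between += 1 and = 1
def get_style (s : String) : List Int :=
  let dict_ : PySem.Dict Char Int :=
    s.toList.foldl
      (fun d ch => if d.contains ch then d.insert ch (d.getD ch 0 + 1) else d.insert ch 1)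
      PySem.Dict.empty
  -- second loop: dict_[ch] never raises KeyError (every ch of s is a key), so getD is exact here
  s.toList.foldl (fun template ch => template ++ [dict_.getD ch 0]) []

-- ===== PORT B =====
-- res = [0]*len(s); for ch in dict.fromkeys(s): idxs = [i for i,c in enumerate(s) if c==ch]; for i in idxs: res[i] = len(idxs)
def get_style_alt (s : String) : List Int :=
  let l := s.toList
  let res := PySem.List.pyRepeat [(0 : Int)] (l.length : Int)
  (PySem.List.dedup l).foldl
    (fun res ch =>
      let idxs := ((PySem.List.enumerate l).filter (fun p => p.2 == ch)).map (·.1)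
      -- res[i] = len(idxs): indices from enumerate are in range, so pySetD never hides an IndexError
      idxs.foldl (fun r i => PySem.List.pySetD r i (idxs.length : Int)) res)
    res

-- ===== PRECONDITION & SPEC =====
def Spec_get_style (s : String) (out : List Int) : Prop := out = get_style_alt s
instance (s : String) (out : List Int) : Decidable (Spec_get_style s out) := by unfold Spec_get_style; infer_instance

-- ===== CLAIM (what is proved, stated in full; the proofs are below) =====
def Claim_equal_get_style : Prop := ∀ (s : String), Dom_get_style s → Spec_get_style s (get_style s)

-- ===== LEMMAS AND PROOFS =====

-- proof-only names for B's gathered index list and outer-loop step (defeq to the port's body)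
def pvIdxs (l : List Char) (ch : Char) : List Int :=
  ((PySem.List.enumerate l).filter (fun p => p.2 == ch)).map (·.1)

def pvStep (l : List Char) : List Int → Char → List Int := fun res ch =>
  (pvIdxs l ch).foldl (fun r i => PySem.List.pySetD r i ((pvIdxs l ch).length : Int)) res

-- A's branching dict update is the plain counter update
theorem dict_build_eq (l : List Char) :
    l.foldl (fun d ch => if d.contains ch then d.insert ch (d.getD ch 0 + 1) else d.insert ch 1)
      (PySem.Dict.empty : PySem.Dict Char Int)
    = l.foldl (fun d ch => d.insert ch (d.getD ch 0 + 1)) PySem.Dict.empty := by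
  suffices h : ∀ (d : PySem.Dict Char Int),
      l.foldl (fun d ch => if d.contains ch then d.insert ch (d.getD ch 0 + 1) else d.insert ch 1) d
      = l.foldl (fun d ch => d.insert ch (d.getD ch 0 + 1)) d from h _
  induction l with
  | nil => intro d; rfl
  | cons h t ih =>
    intro d
    simp only [List.foldl_cons]
    by_cases hc : d.contains h = true
    · rw [if_pos hc, ih]
    · rw [if_neg hc, PySem.Dict.getD_of_not_contains d 0 (Bool.eq_false_iff.mpr hc)]
      simpa using ih _

-- A computes the per-position count map
theorem get_style_eq_map (s : String) :
    get_style s = s.toList.map (fun ch => (s.toList.count ch : Int)) := by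
  unfold get_style
  rw [dict_build_eq]
  rw [PySem.List.foldl_append_singleton_eq_map]
  apply List.map_congr_left
  intro ch _
  rw [PySem.Dict.getD_foldl_insert_add_one]
  simp [PySem.Dict.empty, PySem.Dict.getD, PySem.Dict.get?]

-- membership in the gathered index list
theorem idxs_mem (l : List Char) (ch : Char) (j : Nat) :
    ((j : Int) ∈ pvIdxs l ch) ↔ ∃ h : j < l.length, l[j] = ch := by
  unfold pvIdxs
  simp only [List.mem_map, List.mem_filter, PySem.List.mem_enumerate_iff]
  constructor
  · rintro ⟨⟨i, c⟩, ⟨⟨k, hk, hp⟩, hc⟩, hj⟩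
    cases hp
    simp only [beq_iff_eq] at hc
    simp only [zero_add] at hj
    have hkj : k = j := by exact_mod_cast hj
    subst hkj
    exact ⟨hk, hc⟩
  · rintro ⟨hj, hc⟩
    exact ⟨((j : Int), l[j]), ⟨⟨j, hj, by simp⟩, by simp [hc]⟩, rfl⟩

theorem idxs_nonneg (l : List Char) (ch : Char) (i : Int) (h : i ∈ pvIdxs l ch) :
    0 ≤ i ∧ i.toNat < l.length := by
  unfold pvIdxs at h
  simp only [List.mem_map, List.mem_filter, PySem.List.mem_enumerate_iff] at h
  obtain ⟨⟨a, c⟩, ⟨⟨k, hk, hp⟩, _⟩, hi⟩ := h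
  cases hp
  simp only [zero_add] at hi
  subst hi
  exact ⟨by positivity, by simpa using hk⟩

theorem idxs_length (l : List Char) (ch : Char) :
    (pvIdxs l ch).length = l.count ch := by
  unfold pvIdxs
  rw [List.length_map]
  induction l with
  | nil => simp [PySem.List.enumerate]
  | cons h t ih =>
    have shift : ∀ (a b : Int),
        ((PySem.List.enumerate t a).filter (fun p => p.2 == ch)).length
        = ((PySem.List.enumerate t b).filter (fun p => p.2 == ch)).length := by
      clear ih
      induction t with
      | nil => intro a b; simp [PySem.List.enumerate]
      | cons x xs ihx =>
        intro a b
        rw [PySem.List.enumerate_cons, PySem.List.enumerate_cons]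
        by_cases hx : (x == ch) = true <;> simp [List.filter_cons, hx, ihx (a + 1) (b + 1)]
    rw [PySem.List.enumerate_cons]
    by_cases hx : (h == ch) = true
    · have h1 : (List.filter (fun p => p.2 == ch) (((0 : Int), h) :: PySem.List.enumerate t (0 + 1))).length
          = (List.filter (fun p => p.2 == ch) (PySem.List.enumerate t (0 + 1))).length + 1 := by
        simp [List.filter_cons, hx]
      rw [h1, shift (0 + 1) 0, ih, List.count_cons]
      simp [beq_iff_eq.mp hx]
    · have h1 : (List.filter (fun p => p.2 == ch) (((0 : Int), h) :: PySem.List.enumerate t (0 + 1))).length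
          = (List.filter (fun p => p.2 == ch) (PySem.List.enumerate t (0 + 1))).length := by
        simp [List.filter_cons, hx]
      have hce : ¬ ch = h := fun e => hx (beq_iff_eq.mpr e.symm)
      rw [h1, shift (0 + 1) 0, ih, List.count_cons]
      simp
      exact fun e => hce e.symm

-- the inner write loop: writes k at every listed (in-range, nonneg) index, leaves the rest
theorem foldl_set_get (k : Int) : ∀ (idxs : List Int) (res : List Int) (j : Nat),
    (∀ i ∈ idxs, 0 ≤ i ∧ i.toNat < res.length) →
    (idxs.foldl (fun r i => PySem.List.pySetD r i k) res)[j]? =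
      if (j : Int) ∈ idxs then some k else res[j]? := by
  intro idxs
  induction idxs with
  | nil => intro res j _; simp
  | cons i rest ih =>
    intro res j hb
    have hi := hb i (by simp)
    rw [List.foldl_cons, ih]
    · rw [PySem.List.pySetD_of_nonneg res k hi.1]
      by_cases hr : (j : Int) ∈ rest
      · simp [hr]
      · simp only [hr, if_false, List.mem_cons, or_false]
        by_cases hj : (j : Int) = i
        · have hjn : j = i.toNat := by omega
          subst hjn
          simp [hj, List.getElem?_set, hi.2]
        · have hjn : j ≠ i.toNat := by omega
          simp only [List.getElem?_set, hjn]
          simp [hj]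
          exact fun h => absurd h.symm hjn
    · intro x hx
      have := hb x (by simp [hx])
      simpa [PySem.List.length_pySetD] using this

theorem foldl_set_length (k : Int) : ∀ (idxs : List Int) (res : List Int),
    (idxs.foldl (fun r i => PySem.List.pySetD r i k) res).length = res.length := by
  intro idxs
  induction idxs with
  | nil => intro res; rfl
  | cons i rest ih => intro res; rw [List.foldl_cons, ih, PySem.List.length_pySetD]

-- one outer step, fully characterised
theorem step_get (l : List Char) (ch : Char) (res : List Int) (hlen : res.length = l.length)
    (j : Nat) (hj : j < l.length) :
    (pvStep l res ch)[j]? = if l[j] = ch then some ((l.count ch : Int)) else res[j]? := by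
  unfold pvStep
  rw [foldl_set_get]
  · rw [idxs_length]
    by_cases hc : l[j] = ch
    · rw [if_pos ((idxs_mem l ch j).mpr ⟨hj, hc⟩), if_pos hc]
    · rw [if_neg (fun hm => hc ((idxs_mem l ch j).mp hm).2), if_neg hc]
  · intro i hi
    have := idxs_nonneg l ch i hi
    omega

-- the outer loop over a set C of characters
theorem outer_get (l : List Char) : ∀ (C : List Char) (res : List Int),
    res.length = l.length → ∀ (j : Nat) (hj : j < l.length),
    (C.foldl (pvStep l) res)[j]? =
      if l[j] ∈ C then some ((l.count l[j] : Int)) else res[j]? := by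
  intro C
  induction C with
  | nil => intro res _ j hj; simp
  | cons ch rest ih =>
    intro res hlen j hj
    have hsl : (pvStep l res ch).length = l.length := by
      unfold pvStep; rw [foldl_set_length]; exact hlen
    rw [List.foldl_cons, ih _ hsl j hj]
    by_cases hr : l[j] ∈ rest
    · simp [hr]
    · simp only [hr, if_false, List.mem_cons, or_false]
      rw [step_get l ch res hlen j hj]
      by_cases hc : l[j] = ch <;> simp [hc]

theorem outer_length (l : List Char) : ∀ (C : List Char) (res : List Int),
    (C.foldl (pvStep l) res).length = res.length := by
  intro C
  induction C with
  | nil => intro res; rfl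
  | cons ch rest ih =>
    intro res
    rw [List.foldl_cons, ih]
    unfold pvStep; rw [foldl_set_length]

-- B computes the per-position count map too
theorem get_style_alt_eq_map (s : String) :
    get_style_alt s = s.toList.map (fun ch => (s.toList.count ch : Int)) := by
  show (PySem.List.dedup s.toList).foldl (pvStep s.toList)
      (PySem.List.pyRepeat [(0 : Int)] (s.toList.length : Int))
    = s.toList.map (fun ch => (s.toList.count ch : Int))
  rw [PySem.List.pyRepeat_singleton]
  have hrl : (List.replicate (Int.toNat (s.toList.length : Int)) (0 : Int)).length
      = s.toList.length := by simp
  apply List.ext_getElem?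
  intro j
  by_cases hj : j < s.toList.length
  · rw [outer_get s.toList _ _ hrl j hj]
    rw [if_pos (by simpa [PySem.List.mem_dedup] using List.getElem_mem hj)]
    rw [List.getElem?_map, List.getElem?_eq_getElem hj]
    rfl
  · have h1 : s.toList.length ≤ j := by omega
    rw [List.getElem?_eq_none (by rw [outer_length, hrl]; exact h1),
        List.getElem?_eq_none (by simpa using h1)]

-- ===== VERDICT (by name: the statement is the Claim_ definition above) =====
theorem get_style_spec : Claim_equal_get_style := by
  intro s _
  unfold Spec_get_style
  rw [get_style_eq_map, get_style_alt_eq_map]
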